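-- pv_equiv track=rewrite | github.com/utkuvibing/thermoanalyzer | core/data_io.py | _find_header_and_data_rows
-- ===== SOURCE A (Python) =====
-- def _find_header_and_data_rows(
--     sample_text: str, delimiter: str, decimal_sep: str
-- ) -> tuple[int, int]:
--     """Return (header_row, data_start_row) as 0-based indices."""
--     lines = sample_text.splitlines()
--     header_row = 0
--     data_start_row = 1
--
--     # Normalise decimal separators for numeric tests
--     def _parse_numeric(val: str) -> bool:
--         v = val.strip()
--         if decimal_sep == ",":
--             v = v.replace(",", ".", 1)
--         try:
--             float(v)
--             return True
--         except ValueError: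
--             return False
--
--     for i, line in enumerate(lines):
--         if not line.strip():
--             continue
--         parts = line.split(delimiter) if delimiter != " " else line.split()
--         if not parts:
--             continue
--
--         numeric_count = sum(_parse_numeric(p) for p in parts)
--         total = len(parts)
--
--         # If less than half the fields are numeric, treat as a header row
--         if total > 0 and numeric_count / total < 0.5:
--             header_row = i
--         else:
--             # First predominantly numeric row is where data starts
--             data_start_row = i
--             break
--     else:
--         # All lines appear non-numeric — keep defaults
--         pass
--
--     # Ensure data_start_row > header_row
--     if data_start_row <= header_row:
--         data_start_row = header_row + 1
--
--     return header_row, data_start_row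
-- ===== SOURCE B (Python) =====
-- def _find_header_and_data_rows(
--     sample_text: str, delimiter: str, decimal_sep: str
-- ) -> tuple[int, int]:
--     """Return (header_row, data_start_row) as 0-based indices."""
--
--     def _parse_numeric(val: str) -> bool:
--         v = val.strip()
--         if decimal_sep == ",":
--             v = v.replace(",", ".", 1)
--         try:
--             float(v)
--             return True
--         except ValueError:
--             return False
--
--     # Pass 1: classify every non-blank line as numeric-majority or not.
--     flags = []
--     for i, line in enumerate(sample_text.splitlines()):
--         if line.strip():
--             parts = line.split(delimiter) if delimiter != " " else line.split()
--             flags.append((i, 2 * sum(map(_parse_numeric, parts)) >= len(parts)))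
--
--     # Pass 2: first numeric-majority entry starts the data; the entry just
--     # before it (or the last entry, if none is numeric) is the header.
--     k = next((j for j, (_, numeric) in enumerate(flags) if numeric), None)
--     if k is None:
--         header_row = flags[-1][0] if flags else 0
--         data_start_row = 1
--     else:
--         header_row = flags[k - 1][0] if k > 0 else 0
--         data_start_row = flags[k][0]
--
--     if data_start_row <= header_row:
--         data_start_row = header_row + 1
--     return header_row, data_start_row
-- ===== Notes on version B (the rewrite author's own statement) =====
-- stated objective: alternative
-- what changed: Replaces A's single fused detection loop (mutable header_row/data_start_row updated in place with an early break) by two passes: a classification pass that maps every non-blank line to an (index, is_numeric_majority) flag, followed by an index-based selection that takes the first numeric flag position k and reads header/data rows from flags[k-1]/flags[k] (or the last flag when no line is numeric).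
import Mathlib
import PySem

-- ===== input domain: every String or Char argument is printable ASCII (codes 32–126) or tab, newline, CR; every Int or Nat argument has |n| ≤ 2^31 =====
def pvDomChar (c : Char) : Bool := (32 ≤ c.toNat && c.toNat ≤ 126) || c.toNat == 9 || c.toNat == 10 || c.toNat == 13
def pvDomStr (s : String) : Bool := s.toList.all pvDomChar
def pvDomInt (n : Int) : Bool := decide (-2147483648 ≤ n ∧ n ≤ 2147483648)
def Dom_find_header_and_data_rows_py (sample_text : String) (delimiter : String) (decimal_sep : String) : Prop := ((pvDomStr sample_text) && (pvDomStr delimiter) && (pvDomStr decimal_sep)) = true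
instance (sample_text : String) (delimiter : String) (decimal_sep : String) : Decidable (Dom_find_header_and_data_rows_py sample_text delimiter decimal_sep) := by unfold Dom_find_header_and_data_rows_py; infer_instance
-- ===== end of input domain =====

-- ===== PORT A =====
-- B rewrites the fused detect-loop (mutable state + break) as a classify pass producing
-- (index, is_numeric_majority) flags plus an index-based selection; equal results, objective: alternative.
-- Shared helpers: both Pythons contain the identical `_parse_numeric` helper and the identical
-- `parts = line.split(delimiter) if delimiter != " " else line.split()` expression, ported once here.

-- hand port of v.replace(",", ".", 1): replace the FIRST ',' only (exact: old/new are single chars)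
def pvReplaceFirstComma : List Char → List Char
  | [] => []
  | c :: cs => if c = ',' then '.' :: cs else c :: pvReplaceFirstComma cs

-- hand port of CPython's float-from-string grammar (validity only; exact on the ASCII domain):
-- digitpart = digit (["_"] digit)*  — consume a maximal digitpart tail
def pvDigitsTail : List Char → List Char
  | '_' :: c :: cs => if c.isDigit then pvDigitsTail cs else '_' :: c :: cs
  | c :: cs => if c.isDigit then pvDigitsTail cs else c :: cs
  | [] => []

-- consume one digitpart; none if there is no leading digit
def pvDigits? : List Char → Option (List Char)
  | c :: cs => if c.isDigit then some (pvDigitsTail cs) else none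
  | [] => none

-- optional exponent: empty, or "e" [sign] digitpart consuming everything
def pvExpOk : List Char → Bool
  | [] => true
  | 'e' :: rest =>
    let rest' := match rest with
      | '+' :: t => t
      | '-' :: t => t
      | t => t
    match pvDigits? rest' with
    | some [] => true
    | _ => false
  | _ => false

-- does float(s) succeed? (CPython: strip, optional sign, inf/infinity/nan case-insensitive,
-- or [digitpart] ["." [digitpart]] [exponent] with at least one digit; exact on ASCII input)
def pvFloatOk (s : List Char) : Bool :=
  let t := PySem.Chars.lower (PySem.Chars.strip s)
  let t := match t with
    | '+' :: r => r
    | '-' :: r => r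
    | r => r
  if t = "inf".toList ∨ t = "infinity".toList ∨ t = "nan".toList then true
  else
    match t with
    | '.' :: rest =>
      (match pvDigits? rest with
       | some r => pvExpOk r
       | none => false)
    | _ =>
      match pvDigits? t with
      | some ('.' :: rest2) =>
        (match pvDigits? rest2 with
         | some r2 => pvExpOk r2
         | none => pvExpOk rest2)
      | some r => pvExpOk r
      | none => false

-- port of the nested helper `_parse_numeric` (identical in A and in B)
def pvParseNumeric (decimal_sep : String) (val : List Char) : Bool :=
  let v := PySem.Chars.strip val
  let v := if decimal_sep = "," then pvReplaceFirstComma v else v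
  pvFloatOk v

-- port of `line.split(delimiter) if delimiter != " " else line.split()` (identical in A and in B);
-- the .getD [] is never reached inside Pre_ (split? is none only for delimiter = "", where Python raises)
def pvParts (delimiter : String) (line : List Char) : List (List Char) :=
  if delimiter ≠ " " then (PySem.Chars.split? line delimiter.toList).getD []
  else PySem.Chars.split₀ line

-- A's for-loop with break/else; state = (header_row, data_start_row).
-- `numeric_count / total < 0.5` (float division) is ported as `2 * numeric_count < total`,
-- exact for every representable input (total below 2^52).
def pvLoopA (delimiter decimal_sep : String) :
    List (Int × List Char) → Int → Int → Int × Int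
  | [], header_row, data_start_row => (header_row, data_start_row)
  | (i, line) :: rest, header_row, data_start_row =>
    if (PySem.Chars.strip line).isEmpty then
      pvLoopA delimiter decimal_sep rest header_row data_start_row
    else
      let parts := pvParts delimiter line
      if parts.isEmpty then pvLoopA delimiter decimal_sep rest header_row data_start_row
      else
        let numeric_count := parts.countP (pvParseNumeric decimal_sep)
        let total := parts.length
        if 0 < total ∧ 2 * numeric_count < total then
          pvLoopA delimiter decimal_sep rest i data_start_row
        else (header_row, i)

def find_header_and_data_rows_py (sample_text : String) (delimiter : String) (decimal_sep : String) : Int × Int :=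
  let lines := (PySem.Str.splitlines sample_text).map String.toList
  let r := pvLoopA delimiter decimal_sep (PySem.List.enumerate lines) 0 1
  let header_row := r.1
  let data_start_row := if r.2 ≤ r.1 then r.1 + 1 else r.2
  (header_row, data_start_row)

-- ===== PORT B =====
-- pass 1 of Source B: classify every non-blank line as (index, numeric-majority?)
def pvFlags (delimiter decimal_sep : String) (items : List (Int × List Char)) : List (Int × Bool) :=
  items.filterMap fun e =>
    if (PySem.Chars.strip e.2).isEmpty then none
    else
      let parts := pvParts delimiter e.2
      some (e.1, decide (parts.length ≤ 2 * parts.countP (pvParseNumeric decimal_sep)))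

-- pass 2 of Source B: k = next((j for j, (_, numeric) in enumerate(flags) if numeric), None),
-- then header/data from flags[k-1]/flags[k] (or last flag / defaults when k is None)
def pvSelect (flags : List (Int × Bool)) : Int × Int :=
  match flags.findIdx? (·.2) with
  | none => ((flags.getLast?.map (·.1)).getD 0, 1)
  | some k =>
    (if 0 < k then ((flags[k - 1]?).map (·.1)).getD 0 else 0,
     ((flags[k]?).map (·.1)).getD 0)

def find_header_and_data_rows_py_alt (sample_text : String) (delimiter : String) (decimal_sep : String) : Int × Int :=
  let flags := pvFlags delimiter decimal_sep
      (PySem.List.enumerate ((PySem.Str.splitlines sample_text).map String.toList))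
  let hd := pvSelect flags
  if hd.2 ≤ hd.1 then (hd.1, hd.1 + 1) else hd

-- ===== PRECONDITION & SPEC =====
-- Pre_ excludes exactly the inputs where A raises: delimiter = "" reaches line.split("") (ValueError)
-- as soon as some line is non-blank (B raises identically there).
def Pre_find_header_and_data_rows_py (sample_text : String) (delimiter : String) (decimal_sep : String) : Prop :=
  delimiter ≠ "" ∨ ∀ line ∈ PySem.Str.splitlines sample_text, PySem.Chars.strip line.toList = []
instance (sample_text : String) (delimiter : String) (decimal_sep : String) : Decidable (Pre_find_header_and_data_rows_py sample_text delimiter decimal_sep) := by unfold Pre_find_header_and_data_rows_py; infer_instance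

def pvWitness_find_header_and_data_rows_py : String × String × String :=
  ("time, temp\n1.0, 2.5\n2.0, 3.5", ",", ".")

def Spec_find_header_and_data_rows_py (sample_text : String) (delimiter : String) (decimal_sep : String) (out : Int × Int) : Prop := out = find_header_and_data_rows_py_alt sample_text delimiter decimal_sep
instance (sample_text : String) (delimiter : String) (decimal_sep : String) (out : Int × Int) : Decidable (Spec_find_header_and_data_rows_py sample_text delimiter decimal_sep out) := by unfold Spec_find_header_and_data_rows_py; infer_instance

-- ===== CLAIM (what is proved, stated in full; the proofs are below) =====
def Claim_equal_find_header_and_data_rows_py : Prop := ∀ (sample_text : String) (delimiter : String) (decimal_sep : String), Dom_find_header_and_data_rows_py sample_text delimiter decimal_sep → Pre_find_header_and_data_rows_py sample_text delimiter decimal_sep → Spec_find_header_and_data_rows_py sample_text delimiter decimal_sep (find_header_and_data_rows_py sample_text delimiter decimal_sep)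

-- ===== LEMMAS AND PROOFS =====

-- B's selection with a general default h (the header value accumulated so far); pvSelB fl 0 = pvSelect fl
def pvSelB (fl : List (Int × Bool)) (h : Int) : Int × Int :=
  match fl.findIdx? (·.2) with
  | none => ((fl.getLast?.map (·.1)).getD h, 1)
  | some k =>
    (if 0 < k then ((fl[k - 1]?).map (·.1)).getD h else h,
     ((fl[k]?).map (·.1)).getD 0)

lemma pvSelB_zero (fl : List (Int × Bool)) : pvSelect fl = pvSelB fl 0 := rfl

lemma pvSelB_cons_true (i : Int) (fl : List (Int × Bool)) (h : Int) :
    pvSelB ((i, true) :: fl) h = (h, i) := by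
  simp [pvSelB, List.findIdx?_cons]

lemma pvSelB_cons_false (i : Int) (fl : List (Int × Bool)) (h : Int) :
    pvSelB ((i, false) :: fl) h = pvSelB fl i := by
  cases hf : fl.findIdx? (·.2) with
  | none =>
    cases fl with
    | nil => simp [pvSelB, List.findIdx?_cons]
    | cons a t =>
      simp [pvSelB, List.findIdx?_cons, hf, List.getLast?_cons]
  | some k =>
    have hk : k < fl.length := (List.findIdx?_eq_some_iff_findIdx_eq.mp hf).1
    cases k with
    | zero =>
      simp [pvSelB, List.findIdx?_cons, hf]
    | succ j =>
      have hj : j < fl.length := Nat.lt_of_succ_lt hk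
      simp [pvSelB, List.findIdx?_cons, hf, List.getElem?_eq_getElem hj,
        List.getElem?_eq_getElem hk]

lemma pvLoopA_eq_selB (delimiter decimal_sep : String) :
    ∀ (items : List (Int × List Char)) (h : Int),
    (∀ p ∈ items, (PySem.Chars.strip p.2).isEmpty = false →
        (pvParts delimiter p.2).isEmpty = false) →
    pvLoopA delimiter decimal_sep items h 1 =
      pvSelB (pvFlags delimiter decimal_sep items) h := by
  intro items
  induction items with
  | nil => intro h _; simp [pvLoopA, pvFlags, pvSelB]
  | cons p rest ih =>
    intro h hne
    obtain ⟨i, line⟩ := p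
    have hner : ∀ q ∈ rest, (PySem.Chars.strip q.2).isEmpty = false →
        (pvParts delimiter q.2).isEmpty = false :=
      fun q hq => hne q (List.mem_cons_of_mem _ hq)
    cases hsb : (PySem.Chars.strip line).isEmpty with
    | true =>
      simp only [pvLoopA, pvFlags, List.filterMap_cons, hsb, if_true]
      exact ih h hner
    | false =>
      have hp : (pvParts delimiter line).isEmpty = false := hne (i, line) (by simp) hsb
      have hlen : 0 < (pvParts delimiter line).length := by
        cases hc : pvParts delimiter line with
        | nil => rw [hc] at hp; simp at hp
        | cons a t => simp
      by_cases hmaj : (pvParts delimiter line).length ≤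
          2 * (pvParts delimiter line).countP (pvParseNumeric decimal_sep)
      · have hcond : ¬ (0 < (pvParts delimiter line).length ∧
            2 * (pvParts delimiter line).countP (pvParseNumeric decimal_sep) <
              (pvParts delimiter line).length) := by omega
        simp only [pvLoopA, pvFlags, List.filterMap_cons, hsb, hp, Bool.false_eq_true,
          if_false, hcond, decide_eq_true hmaj]
        rw [pvSelB_cons_true]
      · have hcond : 0 < (pvParts delimiter line).length ∧
            2 * (pvParts delimiter line).countP (pvParseNumeric decimal_sep) <
              (pvParts delimiter line).length := by omega
        have hdec : decide ((pvParts delimiter line).length ≤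
            2 * (pvParts delimiter line).countP (pvParseNumeric decimal_sep)) = false := by
          simpa using hmaj
        simp only [pvLoopA, pvFlags, List.filterMap_cons, hsb, hp, Bool.false_eq_true,
          if_false, if_pos hcond, hdec]
        rw [pvSelB_cons_false]
        exact ih i hner

lemma pvMem_enumerate_snd {α : Type} (xs : List α) :
    ∀ (k : Int) (p : Int × α), p ∈ PySem.List.enumerate xs k → p.2 ∈ xs := by
  induction xs with
  | nil => intro k p hp; simp [PySem.List.enumerate] at hp
  | cons x t ih =>
    intro k p hp
    simp only [PySem.List.enumerate, List.mem_cons] at hp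
    rcases hp with h | h
    · simp [h]
    · exact List.mem_cons_of_mem _ (ih _ _ h)

lemma pvSplitOn_go_ne_nil (sep : List Char) :
    ∀ (fuel : Nat) (l cur : List Char) (acc : List (List Char)),
    PySem.Chars.splitOn.go sep fuel l cur acc ≠ [] := by
  intro fuel
  induction fuel with
  | zero => intro l cur acc; simp [PySem.Chars.splitOn.go]
  | succ n ih =>
    intro l cur acc
    cases l with
    | nil => simp [PySem.Chars.splitOn.go]
    | cons c rest =>
      rw [PySem.Chars.splitOn.go]
      split_ifs <;> apply ih

lemma pvSplit₀_go_ne_nil :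
    ∀ (l cur : List Char) (acc : List (List Char)),
    (cur ≠ [] ∨ acc ≠ [] ∨ ∃ c ∈ l, PySem.Chars.isspace c = false) →
    PySem.Chars.split₀.go l cur acc ≠ [] := by
  intro l
  induction l with
  | nil =>
    intro cur acc hyp
    rw [PySem.Chars.split₀.go]
    rcases hyp with h | h | h
    · simp [List.isEmpty_eq_false_iff.mpr h]
    · cases hc : cur.isEmpty <;> simp [h]
    · simp at h
  | cons c rest ih =>
    intro cur acc hyp
    rw [PySem.Chars.split₀.go]
    cases hsp : PySem.Chars.isspace c with
    | true =>
      simp only [if_true]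
      cases hc : cur.isEmpty with
      | true =>
        simp only [if_true]
        apply ih
        have hcur : cur = [] := List.isEmpty_iff.mp hc
        rcases hyp with h | h | ⟨d, hd, hds⟩
        · exact absurd hcur h
        · exact Or.inr (Or.inl h)
        · rcases List.mem_cons.mp hd with rfl | hdr
          · rw [hds] at hsp; exact absurd hsp (by simp)
          · exact Or.inr (Or.inr ⟨d, hdr, hds⟩)
      | false =>
        simp only [Bool.false_eq_true, if_false]
        exact ih [] _ (Or.inr (Or.inl (by simp)))
    | false =>
      simp only [Bool.false_eq_true, if_false]
      exact ih (c :: cur) acc (Or.inl (by simp))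

lemma pvExists_nonspace_of_strip_ne (l : List Char)
    (h : (PySem.Chars.strip l).isEmpty = false) :
    ∃ c ∈ l, PySem.Chars.isspace c = false := by
  by_contra hc
  have hall : ∀ c ∈ l, PySem.Chars.isspace c = true := by
    intro c hcl
    cases hsp : PySem.Chars.isspace c with
    | false => exact absurd ⟨c, hcl, hsp⟩ hc
    | true => rfl
  have hl : PySem.Chars.lstrip l = [] := by
    rw [PySem.Chars.lstrip, List.dropWhile_eq_nil_iff]
    exact hall
  simp [PySem.Chars.strip, hl, PySem.Chars.rstrip] at h

lemma pvParts_ne_nil (delimiter : String) (line : List Char)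
    (hpre : delimiter ≠ "" ∨ PySem.Chars.strip line = [])
    (hne : (PySem.Chars.strip line).isEmpty = false) :
    (pvParts delimiter line).isEmpty = false := by
  have hd : delimiter ≠ "" := by
    rcases hpre with h | h
    · exact h
    · rw [h] at hne; simp at hne
  rw [pvParts]
  by_cases hsp : delimiter = " "
  · simp only [hsp, ne_eq, not_true_eq_false, if_false]
    rw [List.isEmpty_eq_false_iff]
    exact pvSplit₀_go_ne_nil line [] []
      (Or.inr (Or.inr (pvExists_nonspace_of_strip_ne line hne)))
  · have hdl : delimiter.toList ≠ [] := fun hc => hd (String.toList_eq_nil_iff.mp hc)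
    simp only [if_pos hsp, PySem.Chars.split?, List.isEmpty_eq_false_iff.mpr hdl,
      Bool.false_eq_true, if_false, Option.getD_some]
    rw [List.isEmpty_eq_false_iff, PySem.Chars.splitOn]
    apply pvSplitOn_go_ne_nil

-- ===== VERDICT (by name: the statement is the Claim_ definition above) =====
theorem find_header_and_data_rows_py_spec : Claim_equal_find_header_and_data_rows_py := by
  intro sample_text delimiter decimal_sep _hdom hpre
  unfold Spec_find_header_and_data_rows_py
  simp only [find_header_and_data_rows_py, find_header_and_data_rows_py_alt]
  have hne : ∀ p ∈ PySem.List.enumerate ((PySem.Str.splitlines sample_text).map String.toList),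
      (PySem.Chars.strip p.2).isEmpty = false → (pvParts delimiter p.2).isEmpty = false := by
    intro p hp hstrip
    have hmem := pvMem_enumerate_snd _ _ _ hp
    rcases List.mem_map.mp hmem with ⟨L, hL, hEq⟩
    refine pvParts_ne_nil delimiter p.2 ?_ hstrip
    rcases hpre with h | h
    · exact Or.inl h
    · exact Or.inr (hEq ▸ h L hL)
  rw [pvLoopA_eq_selB delimiter decimal_sep _ 0 hne, pvSelB_zero]
  split_ifs <;> simp
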